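-- pv_equiv track=rewrite | github.com/sdraeger/DDALAB | packages/ddalab-cli/ddalab_qt/app/main_window_analysis.py | _generate_dda_monomials
-- ===== SOURCE A (Python) =====
-- from itertools import combinations_with_replacement
-- from typing import Dict, List, Optional
--
-- def _generate_dda_monomials(
--
--     num_delays: int,
--     polynomial_order: int,
-- ) -> List[tuple[int, ...]]:
--     if num_delays < 1 or polynomial_order < 1:
--         return []
--     monomials: List[tuple[int, ...]] = []
--     for delay_index in range(1, num_delays + 1):
--         monomials.append((0, delay_index))
--     choices = list(range(1, num_delays + 1))
--     for degree in range(2, polynomial_order + 1):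
--         monomials.extend(tuple(combo) for combo in combinations_with_replacement(choices, degree))
--     return monomials
-- ===== SOURCE B (Python) =====
-- from typing import List
--
--
-- def _generate_dda_monomials(
--     num_delays: int,
--     polynomial_order: int,
-- ) -> List[tuple[int, ...]]:
--     if num_delays < 1 or polynomial_order < 1:
--         return []
--     result: List[tuple[int, ...]] = [(0, d) for d in range(1, num_delays + 1)]
--     # dynamic programming over degrees: each degree-k level is obtained by
--     # extending every degree-(k-1) tuple on the right with v >= its last element,
--     # which preserves the non-decreasing lexicographic order per degree
--     level: List[tuple[int, ...]] = [(v,) for v in range(1, num_delays + 1)]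
--     for _degree in range(2, polynomial_order + 1):
--         level = [t + (v,) for t in level for v in range(t[-1], num_delays + 1)]
--         result.extend(level)
--     return result
-- ===== Notes on version B (the rewrite author's own statement) =====
-- stated objective: alternative
-- what changed: Replaces the per-degree itertools.combinations_with_replacement calls with an iterative level-by-level dynamic program that extends each previous-degree tuple on the right by every value >= its last element, reusing the previous level instead of re-enumerating each degree from scratch.
import Mathlib
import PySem

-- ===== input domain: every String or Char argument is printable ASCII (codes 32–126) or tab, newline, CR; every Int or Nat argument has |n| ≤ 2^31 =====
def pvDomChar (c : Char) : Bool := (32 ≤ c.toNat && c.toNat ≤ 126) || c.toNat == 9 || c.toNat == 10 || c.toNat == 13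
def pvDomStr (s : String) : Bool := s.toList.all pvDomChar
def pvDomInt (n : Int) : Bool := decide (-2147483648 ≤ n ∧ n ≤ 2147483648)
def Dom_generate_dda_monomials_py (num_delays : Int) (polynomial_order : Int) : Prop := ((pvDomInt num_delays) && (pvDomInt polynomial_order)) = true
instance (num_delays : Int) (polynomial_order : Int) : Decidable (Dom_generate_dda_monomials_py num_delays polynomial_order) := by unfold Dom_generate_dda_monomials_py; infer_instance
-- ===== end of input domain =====

-- ===== PORT A =====
-- B replaces the per-degree combinations_with_replacement enumeration with an iterative
-- level-by-level dynamic program extending each previous-degree tuple on the right (alternative).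

-- exact recursive specification of itertools.combinations_with_replacement(choices, r):
-- lexicographic by position indices i1 <= i2 <= ... <= ir
def pvCWR : List Int → Nat → List (List Int)
  | _, 0 => [[]]
  | [], _ + 1 => []
  | x :: xs, r + 1 => ((pvCWR (x :: xs) r).map (fun t => x :: t)) ++ pvCWR xs (r + 1)
termination_by xs r => (r, xs.length)

def generate_dda_monomials_py (num_delays : Int) (polynomial_order : Int) : List (List Int) :=
  if num_delays < 1 ∨ polynomial_order < 1 then []
  else
    -- for delay_index in range(1, num_delays+1): monomials.append((0, delay_index))
    let monomials := (PySem.List.pyRange 1 (num_delays + 1) 1).map (fun d => [0, d])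
    let choices := PySem.List.pyRange 1 (num_delays + 1) 1
    -- for degree in range(2, polynomial_order+1): monomials.extend(cwr(choices, degree))
    (PySem.List.pyRange 2 (polynomial_order + 1) 1).foldl
      (fun acc degree => acc ++ pvCWR choices degree.toNat) monomials

-- ===== PORT B =====
-- level = [t + (v,) for t in level for v in range(t[-1], num_delays + 1)]
-- (t[-1] via pyGet?; levels only ever hold non-empty tuples, so the .getD 0 is unreachable)
def pvExtendLevel (num_delays : Int) (level : List (List Int)) : List (List Int) :=
  level.flatMap (fun t =>
    (PySem.List.pyRange ((PySem.List.pyGet? t (-1)).getD 0) (num_delays + 1) 1).map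
      (fun v => t ++ [v]))

def generate_dda_monomials_py_alt (num_delays : Int) (polynomial_order : Int) : List (List Int) :=
  if num_delays < 1 ∨ polynomial_order < 1 then []
  else
    let result := (PySem.List.pyRange 1 (num_delays + 1) 1).map (fun d => [0, d])
    let level := (PySem.List.pyRange 1 (num_delays + 1) 1).map (fun v => [v])
    ((PySem.List.pyRange 2 (polynomial_order + 1) 1).foldl
      (fun st (_ : Int) =>
        let lvl := pvExtendLevel num_delays st.2
        (st.1 ++ lvl, lvl))
      (result, level)).1

-- ===== PRECONDITION & SPEC =====
def Spec_generate_dda_monomials_py (num_delays : Int) (polynomial_order : Int) (out : List (List Int)) : Prop := out = generate_dda_monomials_py_alt num_delays polynomial_order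
instance (num_delays : Int) (polynomial_order : Int) (out : List (List Int)) : Decidable (Spec_generate_dda_monomials_py num_delays polynomial_order out) := by unfold Spec_generate_dda_monomials_py; infer_instance

-- ===== CLAIM (what is proved, stated in full; the proofs are below) =====
def Claim_equal_generate_dda_monomials_py : Prop := ∀ (num_delays : Int) (polynomial_order : Int), Dom_generate_dda_monomials_py num_delays polynomial_order → Spec_generate_dda_monomials_py num_delays polynomial_order (generate_dda_monomials_py num_delays polynomial_order)

-- ===== LEMMAS AND PROOFS =====

-- the right-extension step, with default s for the (unreachable) empty tuple
def pvExtS (n s : Int) (t : List Int) : List (List Int) :=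
  (PySem.List.pyRange (t.getLast?.getD s) (n + 1) 1).map (fun v => t ++ [v])

theorem pvCWR_one (xs : List Int) : pvCWR xs 1 = xs.map (fun v => [v]) := by
  induction xs with
  | nil => rw [pvCWR]; rfl
  | cons x xs ih => rw [pvCWR, pvCWR, ih]; rfl

theorem pvCWR_ne_nil : ∀ (xs : List Int) (r : Nat) (t : List Int), t ∈ pvCWR xs (r + 1) → t ≠ [] := by
  intro xs
  induction xs with
  | nil => intro r t ht; rw [pvCWR] at ht; simp at ht
  | cons x xs ih =>
    intro r t ht
    rw [pvCWR] at ht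
    rcases List.mem_append.1 ht with h | h
    · obtain ⟨u, _, rfl⟩ := List.mem_map.1 h; simp
    · exact ih r t h

theorem pvFlatMapCongr {α β : Type} (l : List α) (f g : α → List β)
    (h : ∀ x ∈ l, f x = g x) : l.flatMap f = l.flatMap g := by
  induction l with
  | nil => rfl
  | cons x xs ih =>
    simp only [List.flatMap_cons]
    rw [h x (List.mem_cons_self), ih (fun y hy => h y (List.mem_cons_of_mem x hy))]

theorem pvExtS_cons (n s x : Int) (t : List Int) :
    pvExtS n s (x :: t) = (pvExtS n x t).map (fun u => x :: u) := by
  simp [pvExtS, List.getLast?_cons, List.map_map, Function.comp]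

theorem pvExtS_default_irrel (n s s' : Int) (t : List Int) (ht : t ≠ []) :
    pvExtS n s t = pvExtS n s' t := by
  cases t with
  | nil => exact absurd rfl ht
  | cons x u => rw [pvExtS_cons, pvExtS_cons]

theorem pvCWR_decomp (n s : Int) (r : Nat) (h : s < n + 1) :
    pvCWR (PySem.List.pyRange s (n + 1) 1) (r + 1)
      = ((pvCWR (PySem.List.pyRange s (n + 1) 1) r).map (fun t => s :: t))
        ++ pvCWR (PySem.List.pyRange (s + 1) (n + 1) 1) (r + 1) := by
  conv_lhs => rw [PySem.List.pyRange_one_cons h]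
  rw [pvCWR]
  rw [← PySem.List.pyRange_one_cons h]

theorem pvExtS_cwr (n : Int) (r : Nat) (s : Int) :
    (pvCWR (PySem.List.pyRange s (n + 1) 1) r).flatMap (pvExtS n s)
      = pvCWR (PySem.List.pyRange s (n + 1) 1) (r + 1) := by
  match r with
  | 0 =>
    rw [pvCWR, pvCWR_one]
    simp [pvExtS]
  | r + 1 =>
    by_cases h : s < n + 1
    · rw [pvCWR_decomp n s r h, List.flatMap_append]
      have h1 : ((pvCWR (PySem.List.pyRange s (n + 1) 1) r).map (fun t => s :: t)).flatMap (pvExtS n s)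
          = ((pvCWR (PySem.List.pyRange s (n + 1) 1) r).flatMap (pvExtS n s)).map (fun u => s :: u) := by
        rw [List.flatMap_map, List.map_flatMap]
        exact pvFlatMapCongr _ _ _ (fun t _ => pvExtS_cons n s s t)
      rw [h1, pvExtS_cwr n r s]
      have h2 : (pvCWR (PySem.List.pyRange (s + 1) (n + 1) 1) (r + 1)).flatMap (pvExtS n s)
          = pvCWR (PySem.List.pyRange (s + 1) (n + 1) 1) (r + 2) := by
        rw [pvFlatMapCongr _ _ (pvExtS n (s + 1))
          (fun t ht => pvExtS_default_irrel n s (s + 1) t (pvCWR_ne_nil _ r t ht))]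
        exact pvExtS_cwr n (r + 1) (s + 1)
      rw [h2, ← pvCWR_decomp n s (r + 1) h]
    · have hnil : PySem.List.pyRange s (n + 1) 1 = [] :=
        PySem.List.pyRange_one_eq_nil (by omega)
      rw [hnil]
      simp [pvCWR]
termination_by (r, (n + 1 - s).toNat)
decreasing_by
  · exact Prod.Lex.left _ _ (Nat.lt_succ_self r)
  · exact Prod.Lex.right _ (by omega)

theorem pvExtendLevel_cwr (n : Int) (k : Nat) :
    pvExtendLevel n (pvCWR (PySem.List.pyRange 1 (n + 1) 1) (k + 1))
      = pvCWR (PySem.List.pyRange 1 (n + 1) 1) (k + 2) := by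
  unfold pvExtendLevel
  rw [pvFlatMapCongr _ _ (pvExtS n 1) ?_]
  · exact pvExtS_cwr n (k + 1) 1
  · intro t ht
    have hne := pvCWR_ne_nil _ k t ht
    cases t with
    | nil => exact absurd rfl hne
    | cons x u =>
      simp [pvExtS, PySem.List.pyGet?_neg_one, List.getLast?_cons]

theorem pvFold (n b : Int) : ∀ (a : Int) (acc : List (List Int)), 2 ≤ a →
    ((PySem.List.pyRange a b 1).foldl
      (fun st (_ : Int) =>
        let lvl := pvExtendLevel n st.2
        (st.1 ++ lvl, lvl))
      (acc, pvCWR (PySem.List.pyRange 1 (n + 1) 1) (a - 1).toNat)).1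
    = (PySem.List.pyRange a b 1).foldl
        (fun acc2 degree => acc2 ++ pvCWR (PySem.List.pyRange 1 (n + 1) 1) degree.toNat) acc := by
  intro a acc ha
  by_cases h : a < b
  · rw [PySem.List.pyRange_one_cons h]
    simp only [List.foldl_cons]
    have hk : (a - 1).toNat = (a - 2).toNat + 1 := by omega
    have hk2 : a.toNat = (a - 2).toNat + 2 := by omega
    rw [hk, pvExtendLevel_cwr n ((a - 2).toNat), ← hk2]
    have hnext : ((a + 1) - 1).toNat = a.toNat := by omega
    have := pvFold n b (a + 1) (acc ++ pvCWR (PySem.List.pyRange 1 (n + 1) 1) a.toNat) (by omega)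
    rw [hnext] at this
    exact this
  · have hnil : PySem.List.pyRange a b 1 = [] :=
      PySem.List.pyRange_one_eq_nil (by omega)
    rw [hnil]
    rfl
termination_by a => (b - a).toNat
decreasing_by omega

-- ===== VERDICT (by name: the statement is the Claim_ definition above) =====
theorem generate_dda_monomials_py_spec : Claim_equal_generate_dda_monomials_py := by
  intro n p _
  unfold Spec_generate_dda_monomials_py generate_dda_monomials_py generate_dda_monomials_py_alt
  split
  · rfl
  · have hlvl : (PySem.List.pyRange 1 (n + 1) 1).map (fun v => [v])
        = pvCWR (PySem.List.pyRange 1 (n + 1) 1) ((2 : Int) - 1).toNat := by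
      rw [show ((2 : Int) - 1).toNat = 1 by rfl, pvCWR_one]
    rw [hlvl, pvFold n (p + 1) 2 _ (by omega)]
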